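-- pv_equiv track=rewrite | github.com/JudyXhen/2017A2CS | Ch25/recursion2.py | recArray
-- ===== SOURCE A (Python) =====
-- def recArray(nums, index, sum1, sum2):
-- 	if index >= len(nums):
-- 		return sum1 == sum2
-- 	value = nums[index]
-- 	if (value % 5 == 0):
-- 		return recArray(nums, index + 1, sum1 + value, sum2)
-- 	elif (value % 3 == 0):
-- 		return recArray(nums, index + 1, sum1, sum2 + value)
-- 	else:
-- 		return (recArray(nums, index + 1, sum1 + value, sum2) or recArray(nums, index + 1, sum1, sum2 + value))
-- ===== SOURCE B (Python) =====
-- def recArray(nums, index, sum1, sum2):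
--     # Iterative subset-sum pass over the achievable (sum1 - sum2) differences.
--     diffs = {sum1 - sum2}
--     for v in nums[index:]:
--         if v % 5 == 0:
--             diffs = {d + v for d in diffs}
--         elif v % 3 == 0:
--             diffs = {d - v for d in diffs}
--         else:
--             diffs = {d + v for d in diffs} | {d - v for d in diffs}
--     return 0 in diffs
-- ===== Notes on version B (the rewrite author's own statement) =====
-- stated objective: alternative
-- what changed: Replaced A's top-down branching recursion (which tries both assignments of every element not divisible by 5 or 3) by a single left-to-right subset-sum pass maintaining the set of reachable sum1-sum2 differences, finishing with a membership test of 0.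
-- outside the precondition, e.g. on recArray([5], -1, 5, 10): A returns False, B returns True; on recArray([], -1, 0, 0): A raises IndexError, B returns True
import Mathlib
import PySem

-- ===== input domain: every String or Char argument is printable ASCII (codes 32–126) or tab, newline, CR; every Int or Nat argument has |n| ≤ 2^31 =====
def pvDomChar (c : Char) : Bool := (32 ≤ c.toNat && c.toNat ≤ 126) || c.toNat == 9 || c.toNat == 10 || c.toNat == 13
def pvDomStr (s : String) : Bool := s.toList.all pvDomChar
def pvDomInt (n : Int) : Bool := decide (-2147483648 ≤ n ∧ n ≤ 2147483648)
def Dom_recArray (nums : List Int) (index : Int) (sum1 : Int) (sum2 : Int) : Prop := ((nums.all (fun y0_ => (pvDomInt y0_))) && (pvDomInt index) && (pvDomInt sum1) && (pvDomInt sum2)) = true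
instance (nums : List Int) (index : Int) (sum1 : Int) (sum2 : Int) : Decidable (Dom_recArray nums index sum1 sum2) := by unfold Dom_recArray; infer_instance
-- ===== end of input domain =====

-- B replaces A's branching recursion by an iterative subset-sum pass over the set of
-- reachable sum1-sum2 differences, finishing with a membership test of 0.


-- ===== PORT A =====
def recArray (nums : List Int) (index : Int) (sum1 : Int) (sum2 : Int) : Bool :=
  if _h : (nums.length : Int) ≤ index then sum1 == sum2
  else
    match PySem.List.pyGet? nums index with
    | none => false   -- IndexError (outside Pre_)
    | some value =>
      if PySem.Int.mod value 5 == 0 then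
        recArray nums (index + 1) (sum1 + value) sum2
      else if PySem.Int.mod value 3 == 0 then
        recArray nums (index + 1) sum1 (sum2 + value)
      else
        recArray nums (index + 1) (sum1 + value) sum2 ||
        recArray nums (index + 1) sum1 (sum2 + value)
termination_by ((nums.length : Int) - index).toNat
decreasing_by all_goals omega

-- ===== PORT B =====
def recArray_alt (nums : List Int) (index : Int) (sum1 : Int) (sum2 : Int) : Bool :=
  let final : PySem.Set Int :=
    (PySem.List.slice nums (some index) none).foldl
      (fun (diffs : PySem.Set Int) v =>
        if PySem.Int.mod v 5 == 0 then
          PySem.Set.ofList (diffs.map (fun d => d + v))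
        else if PySem.Int.mod v 3 == 0 then
          PySem.Set.ofList (diffs.map (fun d => d - v))
        else
          PySem.Set.union (PySem.Set.ofList (diffs.map (fun d => d + v)))
                          (diffs.map (fun d => d - v)))
      (PySem.Set.ofList [sum1 - sum2])
  PySem.Set.contains final 0

-- ===== PRECONDITION & SPEC =====
-- Pre_ excludes negative index, a corner outside the recursion's natural domain: there A
-- raises IndexError (index < -len) or, via Python's negative-index wraparound, restarts over
-- the whole list, a choice as accidental as B's tail-slice reading of the same corner.
def Pre_recArray (nums : List Int) (index : Int) (sum1 : Int) (sum2 : Int) : Prop :=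
  0 ≤ index
instance (nums : List Int) (index : Int) (sum1 : Int) (sum2 : Int) : Decidable (Pre_recArray nums index sum1 sum2) := by unfold Pre_recArray; infer_instance

def pvWitness_recArray : List Int × Int × Int × Int := ([3, 5, 7], 0, 0, 0)

def Spec_recArray (nums : List Int) (index : Int) (sum1 : Int) (sum2 : Int) (out : Bool) : Prop := out = recArray_alt nums index sum1 sum2
instance (nums : List Int) (index : Int) (sum1 : Int) (sum2 : Int) (out : Bool) : Decidable (Spec_recArray nums index sum1 sum2 out) := by unfold Spec_recArray; infer_instance

-- ===== CLAIM (what is proved, stated in full; the proofs are below) =====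
def Claim_equal_recArray : Prop := ∀ (nums : List Int) (index : Int) (sum1 : Int) (sum2 : Int), Dom_recArray nums index sum1 sum2 → Pre_recArray nums index sum1 sum2 → Spec_recArray nums index sum1 sum2 (recArray nums index sum1 sum2)

-- ===== LEMMAS AND PROOFS =====

-- A's recursion, restated on the suffix list and the difference sum1 - sum2.
def listRecD : List Int → Int → Bool
  | [], d => d == 0
  | v :: l, d =>
    if PySem.Int.mod v 5 == 0 then listRecD l (d + v)
    else if PySem.Int.mod v 3 == 0 then listRecD l (d - v)
    else listRecD l (d + v) || listRecD l (d - v)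

theorem listRecD_nil (d : Int) : listRecD [] d = (d == 0) := rfl

theorem listRecD_cons (v : Int) (l : List Int) (d : Int) :
    listRecD (v :: l) d =
      if PySem.Int.mod v 5 == 0 then listRecD l (d + v)
      else if PySem.Int.mod v 3 == 0 then listRecD l (d - v)
      else listRecD l (d + v) || listRecD l (d - v) := rfl

theorem recArray_eq_listRecD (nums : List Int) (index sum1 sum2 : Int) (h : 0 ≤ index) :
    recArray nums index sum1 sum2 = listRecD (nums.drop index.toNat) (sum1 - sum2) := by
  by_cases hlen : (nums.length : Int) ≤ index
  · rw [recArray, dif_pos hlen, List.drop_eq_nil_of_le (by omega), listRecD_nil,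
      Bool.eq_iff_iff]
    simp only [beq_iff_eq]
    omega
  · have hlt : index.toNat < nums.length := by omega
    have hget : PySem.List.pyGet? nums index = some nums[index.toNat] := by
      rw [PySem.List.pyGet?_of_nonneg nums h, List.getElem?_eq_getElem hlt]
    have h1 : (index + 1).toNat = index.toNat + 1 := by omega
    have ih5 := recArray_eq_listRecD nums (index + 1) (sum1 + nums[index.toNat]) sum2 (by omega)
    have ih3 := recArray_eq_listRecD nums (index + 1) sum1 (sum2 + nums[index.toNat]) (by omega)
    rw [h1] at ih5 ih3
    rw [recArray, dif_neg hlen, hget, List.drop_eq_getElem_cons hlt, listRecD_cons]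
    dsimp only
    split_ifs with h5 h3
    · rw [ih5]; congr 1; omega
    · rw [ih3]; congr 1; omega
    · rw [ih5, ih3]; congr 2 <;> omega
termination_by ((nums.length : Int) - index).toNat
decreasing_by all_goals omega

theorem mem_foldl_step (l : List Int) (diffs : List Int) :
    (0 ∈ l.foldl
      (fun (diffs : PySem.Set Int) v =>
        if PySem.Int.mod v 5 == 0 then
          PySem.Set.ofList (diffs.map (fun d => d + v))
        else if PySem.Int.mod v 3 == 0 then
          PySem.Set.ofList (diffs.map (fun d => d - v))
        else
          PySem.Set.union (PySem.Set.ofList (diffs.map (fun d => d + v)))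
                          (diffs.map (fun d => d - v)))
      diffs)
    ↔ ∃ d ∈ diffs, listRecD l d = true := by
  induction l generalizing diffs with
  | nil =>
    simp only [List.foldl_nil, listRecD_nil, beq_iff_eq]
    constructor
    · intro hm; exact ⟨0, hm, rfl⟩
    · rintro ⟨d, hd, rfl⟩; exact hd
  | cons v l ih =>
    rw [List.foldl_cons]
    have hmem5 : ∀ d' : Int, d' ∈ PySem.Set.ofList (diffs.map (fun d => d + v)) ↔
        ∃ d ∈ diffs, d' = d + v := by
      intro d'
      rw [PySem.Set.mem_ofList, List.mem_map]
      constructor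
      · rintro ⟨d, hd, rfl⟩; exact ⟨d, hd, rfl⟩
      · rintro ⟨d, hd, rfl⟩; exact ⟨d, hd, rfl⟩
    have hmem3 : ∀ d' : Int, d' ∈ PySem.Set.ofList (diffs.map (fun d => d - v)) ↔
        ∃ d ∈ diffs, d' = d - v := by
      intro d'
      rw [PySem.Set.mem_ofList, List.mem_map]
      constructor
      · rintro ⟨d, hd, rfl⟩; exact ⟨d, hd, rfl⟩
      · rintro ⟨d, hd, rfl⟩; exact ⟨d, hd, rfl⟩
    have hmem3' : ∀ d' : Int, d' ∈ diffs.map (fun d => d - v) ↔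
        ∃ d ∈ diffs, d' = d - v := by
      intro d'
      rw [List.mem_map]
      constructor
      · rintro ⟨d, hd, rfl⟩; exact ⟨d, hd, rfl⟩
      · rintro ⟨d, hd, rfl⟩; exact ⟨d, hd, rfl⟩
    split_ifs with h5 h3
    · rw [ih]
      constructor
      · rintro ⟨d', hd', hrec⟩
        obtain ⟨d, hd, rfl⟩ := (hmem5 d').mp hd'
        exact ⟨d, hd, by rw [listRecD_cons, if_pos h5]; exact hrec⟩
      · rintro ⟨d, hd, hrec⟩
        rw [listRecD_cons, if_pos h5] at hrec
        exact ⟨d + v, (hmem5 _).mpr ⟨d, hd, rfl⟩, hrec⟩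
    · rw [ih]
      constructor
      · rintro ⟨d', hd', hrec⟩
        obtain ⟨d, hd, rfl⟩ := (hmem3 d').mp hd'
        exact ⟨d, hd, by rw [listRecD_cons, if_neg h5, if_pos h3]; exact hrec⟩
      · rintro ⟨d, hd, hrec⟩
        rw [listRecD_cons, if_neg h5, if_pos h3] at hrec
        exact ⟨d - v, (hmem3 _).mpr ⟨d, hd, rfl⟩, hrec⟩
    · rw [ih]
      constructor
      · rintro ⟨d', hd', hrec⟩
        rw [PySem.Set.mem_union] at hd'
        rcases hd' with hd' | hd'
        · obtain ⟨d, hd, rfl⟩ := (hmem5 d').mp hd'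
          refine ⟨d, hd, ?_⟩
          rw [listRecD_cons, if_neg h5, if_neg h3, Bool.or_eq_true]
          exact Or.inl hrec
        · obtain ⟨d, hd, rfl⟩ := (hmem3' d').mp hd'
          refine ⟨d, hd, ?_⟩
          rw [listRecD_cons, if_neg h5, if_neg h3, Bool.or_eq_true]
          exact Or.inr hrec
      · rintro ⟨d, hd, hrec⟩
        rw [listRecD_cons, if_neg h5, if_neg h3, Bool.or_eq_true] at hrec
        rcases hrec with hrec | hrec
        · exact ⟨d + v, (PySem.Set.mem_union _ _ _).mpr (Or.inl ((hmem5 _).mpr ⟨d, hd, rfl⟩)), hrec⟩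
        · exact ⟨d - v, (PySem.Set.mem_union _ _ _).mpr (Or.inr ((hmem3' _).mpr ⟨d, hd, rfl⟩)), hrec⟩

theorem recArray_alt_eq_listRecD (nums : List Int) (index sum1 sum2 : Int) (h : 0 ≤ index) :
    recArray_alt nums index sum1 sum2 = listRecD (nums.drop index.toNat) (sum1 - sum2) := by
  unfold recArray_alt
  rw [PySem.List.slice_from _ h, Bool.eq_iff_iff, PySem.Set.contains_iff, mem_foldl_step]
  constructor
  · rintro ⟨d, hd, hrec⟩
    rw [PySem.Set.mem_ofList, List.mem_singleton] at hd
    rwa [hd] at hrec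
  · intro hrec
    exact ⟨sum1 - sum2, (PySem.Set.mem_ofList _ _).mpr (List.mem_singleton.mpr rfl), hrec⟩

-- ===== VERDICT (by name: the statement is the Claim_ definition above) =====
theorem recArray_spec : Claim_equal_recArray := by
  intro nums index sum1 sum2 _ hpre
  unfold Spec_recArray
  rw [recArray_eq_listRecD nums index sum1 sum2 hpre,
      recArray_alt_eq_listRecD nums index sum1 sum2 hpre]
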